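-- pv_equiv track=rewrite | github.com/kaiken1987/AoC2023 | Day9/Day9.py | createHistory
-- ===== SOURCE A (Python) =====
-- def createHistory(values:list)->list:
--    history = [values]
--    while(history[-1].count(0)!=len(history[-1])):
--       curr = []
--       for i in range(1,len(values)):
--          curr.append(values[i]-values[i-1])
--       history.append(curr)
--       values = curr
--    history.reverse()
--    return history
-- ===== SOURCE B (Python) =====
-- def createHistory(values: list) -> list:
--     if values.count(0) == len(values):
--         return [values]
--     diffs = [b - a for a, b in zip(values, values[1:])]
--     return createHistory(diffs) + [values]
-- ===== Notes on version B (the rewrite author's own statement) =====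
-- stated objective: simpler
-- what changed: Replaces the explicit while-loop with history accumulator, index-based inner loop and final reverse() by a direct structural recursion that builds the reversed triangle back-to-front (recursive call first, original level appended last), with the difference level as a zip comprehension.
import Mathlib
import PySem

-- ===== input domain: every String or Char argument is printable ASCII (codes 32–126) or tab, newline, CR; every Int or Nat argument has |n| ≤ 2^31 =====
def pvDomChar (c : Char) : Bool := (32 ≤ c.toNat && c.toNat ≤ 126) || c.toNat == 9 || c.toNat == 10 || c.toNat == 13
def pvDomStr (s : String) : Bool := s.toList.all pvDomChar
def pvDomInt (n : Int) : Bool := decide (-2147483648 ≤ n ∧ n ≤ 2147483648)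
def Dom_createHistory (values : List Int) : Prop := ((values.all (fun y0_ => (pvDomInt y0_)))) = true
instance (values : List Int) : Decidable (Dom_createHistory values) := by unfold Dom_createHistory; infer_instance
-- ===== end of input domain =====

-- B is a simpler direct recursion building the reversed triangle back-to-front; return values agree with A everywhere.

-- termination helper for both ports: v ≠ [] when some element differs from 0
theorem pv_count_ne_len_ne_nil (v : List Int) (h : PySem.List.count v 0 ≠ v.length) : v ≠ [] := by
  intro hnil; subst hnil; simp [PySem.List.count] at h

-- length of A's inner-loop result (cited by the port's decreasing_by)
theorem pv_diffA_length (v : List Int) :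
    ((PySem.List.pyRange 1 (v.length : Int) 1).foldl
      (fun acc i => acc ++ [PySem.List.pyGetD v i 0 - PySem.List.pyGetD v (i - 1) 0]) []).length
      = v.length - 1 := by
  have h := PySem.List.foldl_append_singleton_eq_map
      (fun i => PySem.List.pyGetD v i 0 - PySem.List.pyGetD v (i - 1) 0)
      (PySem.List.pyRange 1 (v.length : Int) 1) []
  simp [h, PySem.List.length_pyRange_one]

-- ===== PORT A =====
-- A's while loop; history[-1] is always the current `values` (history starts as [values]
-- and each turn appends curr and sets values = curr), so the guard reads `values` directly.
def createHistoryLoop (values : List Int) (history : List (List Int)) : List (List Int) :=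
  if PySem.List.count values 0 ≠ values.length then
    let curr := (PySem.List.pyRange 1 (values.length : Int) 1).foldl
      (fun acc i => acc ++ [PySem.List.pyGetD values i 0 - PySem.List.pyGetD values (i - 1) 0]) []
    createHistoryLoop curr (history ++ [curr])
  else history.reverse
termination_by values.length
decreasing_by
  have hne := pv_count_ne_len_ne_nil values (by assumption)
  have hlen : values.length ≠ 0 := List.length_eq_zero_iff.not.mpr hne
  have hl := pv_diffA_length values
  simp only [hl]
  omega

def createHistory (values : List Int) : List (List Int) :=
  createHistoryLoop values [values]

-- ===== PORT B =====
def createHistory_alt (values : List Int) : List (List Int) :=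
  if PySem.List.count values 0 = values.length then [values]
  else
    let diffs := (values.zip (PySem.List.slice values (some 1) none)).map (fun p => p.2 - p.1)
    createHistory_alt diffs ++ [values]
termination_by values.length
decreasing_by
  have hne := pv_count_ne_len_ne_nil values (by assumption)
  have hlen : values.length ≠ 0 := List.length_eq_zero_iff.not.mpr hne
  simp only [List.length_map, List.length_zip, PySem.List.slice_from_one, List.length_tail]
  omega

-- ===== PRECONDITION & SPEC =====
def Spec_createHistory (values : List Int) (out : List (List Int)) : Prop := out = createHistory_alt values
instance (values : List Int) (out : List (List Int)) : Decidable (Spec_createHistory values out) := by unfold Spec_createHistory; infer_instance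

-- ===== CLAIM (what is proved, stated in full; the proofs are below) =====
def Claim_equal_createHistory : Prop := ∀ (values : List Int), Dom_createHistory values → Spec_createHistory values (createHistory values)

-- ===== LEMMAS AND PROOFS =====

-- A's inner loop equals B's zip comprehension
theorem pv_diff_eq (v : List Int) :
    (PySem.List.pyRange 1 (v.length : Int) 1).foldl
      (fun acc i => acc ++ [PySem.List.pyGetD v i 0 - PySem.List.pyGetD v (i - 1) 0]) []
    = (v.zip (PySem.List.slice v (some 1) none)).map (fun p => p.2 - p.1) := by
  rw [PySem.List.foldl_append_singleton_eq_map, PySem.List.slice_from_one]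
  apply List.ext_getElem
  · simp [PySem.List.length_pyRange_one]
  · intro k hk1 hk2
    have hk : k < v.length - 1 := by
      simpa [PySem.List.length_pyRange_one] using hk1
    simp only [List.nil_append, List.getElem_map, List.getElem_zip]
    rw [PySem.List.getElem_pyRange_one]
    rw [show (1 : Int) + (k : Nat) = ((k + 1 : Nat) : Int) from by push_cast; ring]
    rw [show ((k + 1 : Nat) : Int) - 1 = ((k : Nat) : Int) from by push_cast; ring]
    rw [PySem.List.pyGetD_natCast, PySem.List.pyGetD_natCast]
    rw [List.getD_eq_getElem v 0 (by omega : k + 1 < v.length),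
        List.getD_eq_getElem v 0 (by omega : k < v.length)]
    simp [List.getElem_tail]

theorem pv_alt_last (v : List Int) : createHistory_alt v = (createHistory_alt v).dropLast ++ [v] := by
  rw [createHistory_alt]
  split
  · simp
  · simp

theorem pv_loop_eq (v : List Int) (hist : List (List Int)) :
    createHistoryLoop v hist = (createHistory_alt v).dropLast ++ hist.reverse := by
  induction v, hist using createHistoryLoop.induct with
  | case1 v hist hcond curr ih =>
    rw [createHistoryLoop]
    simp only [if_pos hcond]
    rw [ih]
    conv_rhs => rw [createHistory_alt, if_neg hcond]
    simp only [List.reverse_append, List.reverse_singleton, List.dropLast_concat,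
      ← List.append_assoc, ← pv_alt_last]
    have hc : curr = (v.zip (PySem.List.slice v (some 1) none)).map (fun p => p.2 - p.1) :=
      pv_diff_eq v
    rw [hc]
  | case2 v hist hcond =>
    rw [createHistoryLoop]
    simp only [if_neg hcond]
    rw [createHistory_alt, if_pos (not_not.mp hcond)]
    simp

-- ===== VERDICT (by name: the statement is the Claim_ definition above) =====
theorem createHistory_spec : Claim_equal_createHistory := by
  intro values _
  unfold Spec_createHistory createHistory
  rw [pv_loop_eq]
  simpa using (pv_alt_last values).symm
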